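-- pv_equiv track=rewrite | github.com/sungrokgi/coding_python | 프로그래머스/unrated/172927. 광물 캐기/광물 캐기.py | solution
-- ===== SOURCE A (Python) =====
-- def solution(picks, minerals):
--     answer = 0
--     tmp = []
--     dia , iron, st = 0,0,0
--     for i in range(len(minerals)):
--
--         if minerals[i] == "diamond":
--             dia +=1
--         elif minerals[i] == "iron":
--             iron +=1
--         else:
--             st +=1
--         if  i % 5 == 4 or i == len(minerals)-1:
--             tmp.append([dia,iron,st])
--             dia , iron, st = 0,0,0
--     if picks[0]+picks[1]+picks[2] >= len(tmp):
--         tmp.sort(key = lambda x : (-x[0] , -x[1]))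
--     else:
--         a = picks[0]+picks[1]+picks[2]
--         tmp = tmp[0:a:]
--         tmp.sort(key = lambda x : (-x[0] , -x[1]))
--     i = 0
--     while picks[0] and i < len(tmp):
--         answer +=  tmp[i][0]+tmp[i][1] +tmp[i][2]
--         picks[0] -=1
--         i+=1
--
--     while picks[1] and i < len(tmp):
--         answer += 5*tmp[i][0]+tmp[i][1] +tmp[i][2]
--         picks[1] -=1
--         i+=1
--
--     while picks[2] and i < len(tmp):
--         answer += 25*tmp[i][0]+ 5*tmp[i][1] +tmp[i][2]
--         picks[2] -=1
--         i+=1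
--
--     return answer
-- ===== SOURCE B (Python) =====
-- def solution(picks, minerals):
--     total = picks[0] + picks[1] + picks[2]
--     # aggregate minerals into chunks of five, counting each kind per slice
--     chunks = []
--     for j in range(0, len(minerals), 5):
--         g = minerals[j:j+5]
--         d = g.count("diamond")
--         i = g.count("iron")
--         chunks.append((d, i, len(g) - d - i))
--     # truncate to the number of available picks, then sort best-first
--     chunks = chunks[:total]
--     chunks.sort(key=lambda c: (-c[0], -c[1]))
--     # one table-driven walk over the chunks, spending picks 0,1,2 in order
--     W = ((1, 1, 1), (5, 1, 1), (25, 5, 1))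
--     answer = 0
--     t = 0
--     for d, i, s in chunks:
--         while t < 3 and picks[t] == 0:
--             t += 1
--         if t == 3:
--             break
--         wd, wi, ws = W[t]
--         answer += wd * d + wi * i + ws * s
--         picks[t] -= 1
--     return answer
-- ===== Notes on version B (the rewrite author's own statement) =====
-- stated objective: simpler
-- what changed: B builds the chunk aggregates by slicing minerals into groups of five and counting each kind per slice (instead of A's running counters with an i%5==4 flush), always truncates with one slice chunks[:total] (A branches), and replaces A's three separate while loops with one table-driven walk over the chunks that advances the pick type 0,1,2 via a weight table, decrementing picks[t] in place exactly as A does.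
import Mathlib
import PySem

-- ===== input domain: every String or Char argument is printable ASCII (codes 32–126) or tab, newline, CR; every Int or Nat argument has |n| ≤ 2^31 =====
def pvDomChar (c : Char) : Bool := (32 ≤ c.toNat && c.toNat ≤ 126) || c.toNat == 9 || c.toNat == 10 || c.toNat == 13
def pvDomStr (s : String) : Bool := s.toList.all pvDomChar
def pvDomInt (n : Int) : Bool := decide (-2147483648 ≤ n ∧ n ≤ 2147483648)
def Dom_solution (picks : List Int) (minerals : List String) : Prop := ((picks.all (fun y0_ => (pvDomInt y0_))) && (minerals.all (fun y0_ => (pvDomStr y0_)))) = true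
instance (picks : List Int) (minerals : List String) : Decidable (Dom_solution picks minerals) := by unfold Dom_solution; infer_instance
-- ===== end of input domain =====

-- B replaces A's running-counter flush with group-of-five slicing, A's truncation branch with one
-- unconditional slice, and A's three while loops with a single table-driven walk; objective: simpler.
-- Note: both Pythons mutate the picks argument in place (identically); the equivalence proved here
-- is about the return value.


-- ===== PORT A =====
-- the for-loop building tmp: state (dia, iron, st, tmp), flush when i % 5 == 4 or i == n-1
def aChunks : List String → Int → Int → Int → Int → Int → List (Int × Int × Int) → List (Int × Int × Int)
  | [], _, _, _, _, _, tmp => tmp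
  | m :: ms, i, n, dia, iron, st, tmp =>
    let dia' := if m == "diamond" then dia + 1 else dia
    let iron' := if m == "diamond" then iron else if m == "iron" then iron + 1 else iron
    let st' := if m == "diamond" then st else if m == "iron" then st else st + 1
    if PySem.Int.mod i 5 == 4 || i == n - 1 then
      aChunks ms (i + 1) n 0 0 0 (tmp ++ [(dia', iron', st')])
    else
      aChunks ms (i + 1) n dia' iron' st' tmp

-- while picks[0] and i < len(tmp): answer += d+i+s (returns the answer and the unconsumed tail)
def aMine0 : List (Int × Int × Int) → Int → Int → Int × List (Int × Int × Int)
  | [], _, ans => (ans, [])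
  | c :: cs, p, ans =>
    if p ≠ 0 then aMine0 cs (p - 1) (ans + (c.1 + c.2.1 + c.2.2)) else (ans, c :: cs)

-- while picks[1] and i < len(tmp): answer += 5d+i+s
def aMine1 : List (Int × Int × Int) → Int → Int → Int × List (Int × Int × Int)
  | [], _, ans => (ans, [])
  | c :: cs, p, ans =>
    if p ≠ 0 then aMine1 cs (p - 1) (ans + (5 * c.1 + c.2.1 + c.2.2)) else (ans, c :: cs)

-- while picks[2] and i < len(tmp): answer += 25d+5i+s
def aMine2 : List (Int × Int × Int) → Int → Int → Int × List (Int × Int × Int)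
  | [], _, ans => (ans, [])
  | c :: cs, p, ans =>
    if p ≠ 0 then aMine2 cs (p - 1) (ans + (25 * c.1 + 5 * c.2.1 + c.2.2)) else (ans, c :: cs)

def solution (picks : List Int) (minerals : List String) : Int :=
  let tmp := aChunks minerals 0 (minerals.length : Int) 0 0 0 []
  let p0 := PySem.List.pyGetD picks 0 0
  let p1 := PySem.List.pyGetD picks 1 0
  let p2 := PySem.List.pyGetD picks 2 0
  let tmp2 :=
    if p0 + p1 + p2 ≥ (tmp.length : Int) then
      PySem.List.sorted2 tmp (fun x => -x.1) (fun x => -x.2.1)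
    else
      PySem.List.sorted2 (PySem.List.slice tmp (some 0) (some (p0 + p1 + p2)))
        (fun x => -x.1) (fun x => -x.2.1)
  let r0 := aMine0 tmp2 p0 0
  let r1 := aMine1 r0.2 p1 r0.1
  (aMine2 r1.2 p2 r1.1).1

-- ===== PORT B =====
-- for j in range(0, len(minerals), 5): g = minerals[j:j+5]; count each kind in the slice
def bChunks (ms : List String) : List (Int × Int × Int) :=
  (PySem.List.pyRange 0 (ms.length : Int) 5).foldl
    (fun acc j =>
      let g := PySem.List.slice ms (some j) (some (j + 5))
      let d : Int := (g.count "diamond" : Int)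
      let i : Int := (g.count "iron" : Int)
      acc ++ [(d, i, (g.length : Int) - d - i)]) []

-- while t < 3 and picks[t] == 0: t += 1
def bSkip (ps : List Int) (t : Nat) : Nat :=
  if t < 3 ∧ ps.getD t 0 = 0 then bSkip ps (t + 1) else t
termination_by 3 - t

-- weight table W = ((1,1,1),(5,1,1),(25,5,1))
def bW (t : Nat) : Int × Int × Int :=
  ([(1, 1, 1), (5, 1, 1), (25, 5, 1)] : List (Int × Int × Int)).getD t (0, 0, 0)

-- the single walk: advance the pick type, break at 3, spend one pick per chunk
def bWalk : List (Int × Int × Int) → Nat → List Int → Int → Int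
  | [], _, _, ans => ans
  | c :: cs, t, ps, ans =>
    let t' := bSkip ps t
    if t' == 3 then ans
    else
      let w := bW t'
      bWalk cs t' (ps.set t' (ps.getD t' 0 - 1))
        (ans + (w.1 * c.1 + w.2.1 * c.2.1 + w.2.2 * c.2.2))

def solution_alt (picks : List Int) (minerals : List String) : Int :=
  let total := PySem.List.pyGetD picks 0 0 + PySem.List.pyGetD picks 1 0 + PySem.List.pyGetD picks 2 0
  let chunks := PySem.List.slice (bChunks minerals) (some 0) (some total)
  let chunks := PySem.List.sorted2 chunks (fun c => -c.1) (fun c => -c.2.1)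
  bWalk chunks 0 picks 0

-- ===== PRECONDITION & SPEC =====
-- Pre_ excludes exactly the inputs with fewer than three picks, on which A raises IndexError
-- at picks[0]+picks[1]+picks[2] (B raises there too).
def Pre_solution (picks : List Int) (minerals : List String) : Prop := 3 ≤ picks.length
instance (picks : List Int) (minerals : List String) : Decidable (Pre_solution picks minerals) := by unfold Pre_solution; infer_instance

def pvWitness_solution : List Int × List String :=
  ([1, 2, 1], ["diamond", "stone", "iron", "iron", "stone", "diamond", "stone"])

def Spec_solution (picks : List Int) (minerals : List String) (out : Int) : Prop := out = solution_alt picks minerals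
instance (picks : List Int) (minerals : List String) (out : Int) : Decidable (Spec_solution picks minerals out) := by unfold Spec_solution; infer_instance

-- ===== CLAIM (what is proved, stated in full; the proofs are below) =====
def Claim_equal_solution : Prop := ∀ (picks : List Int) (minerals : List String), Dom_solution picks minerals → Pre_solution picks minerals → Spec_solution picks minerals (solution picks minerals)

-- ===== LEMMAS AND PROOFS =====

-- proof-side recursive characterisation of B's grouping: one chunk per take 5 / drop 5
def chunkRec (ms : List String) : List (Int × Int × Int) :=
  if h : ms = [] then []
  else
    let g := ms.take 5
    let d : Int := (g.count "diamond" : Int)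
    let i : Int := (g.count "iron" : Int)
    (d, i, (g.length : Int) - d - i) :: chunkRec (ms.drop 5)
termination_by ms.length
decreasing_by
  simp only [List.length_drop]
  have : ms.length ≠ 0 := fun hl => h (List.eq_nil_of_length_eq_zero hl)
  omega

-- A's per-element counter step, as a fold over a group
def cnt3 : List String → Int × Int × Int → Int × Int × Int
  | [], s => s
  | m :: ms, (d, r, s) =>
    if m == "diamond" then cnt3 ms (d + 1, r, s)
    else if m == "iron" then cnt3 ms (d, r + 1, s)
    else cnt3 ms (d, r, s + 1)

lemma cnt3_eq : ∀ (g : List String) (d r s : Int),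
    cnt3 g (d, r, s) =
      (d + (g.count "diamond" : Int), r + (g.count "iron" : Int),
        s + ((g.length : Int) - (g.count "diamond" : Int) - (g.count "iron" : Int))) := by
  intro g
  induction g with
  | nil => intro d r s; simp [cnt3]
  | cons m t ih =>
    intro d r s
    by_cases hd : m = "diamond"
    · subst hd
      simp [cnt3, ih]
      omega
    · by_cases hi : m = "iron"
      · subst hi
        simp [cnt3, hd, ih]
        omega
      · simp [cnt3, hd, hi, ih, Ne.symm hd, Ne.symm hi]
        omega

lemma chunkRec_nil : chunkRec [] = [] := by simp [chunkRec]

lemma chunkRec_cons (ms : List String) (h : ms ≠ []) :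
    chunkRec ms =
      (((ms.take 5).count "diamond" : Int), ((ms.take 5).count "iron" : Int),
        ((ms.take 5).length : Int) - ((ms.take 5).count "diamond" : Int) - ((ms.take 5).count "iron" : Int))
        :: chunkRec (ms.drop 5) := by
  rw [chunkRec]
  simp [h]

-- chunk of the first j elements, in B's form
lemma cnt3_zero_eq (g : List String) :
    cnt3 g (0, 0, 0) =
      ((g.count "diamond" : Int), (g.count "iron" : Int),
        (g.length : Int) - (g.count "diamond" : Int) - (g.count "iron" : Int)) := by
  simpa using cnt3_eq g 0 0 0

-- main chunk-building lemma: A's flush loop, started j slots before the next group boundary,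
-- produces the current partial chunk over take j followed by B's chunks of the rest
lemma aChunks_eq_general : ∀ (ms : List String) (j : Nat) (i n d r s : Int)
    (tmp : List (Int × Int × Int)),
    1 ≤ j → j ≤ 5 → PySem.Int.mod i 5 = 5 - (j : Int) → 0 ≤ i → n = i + ms.length →
    aChunks ms i n d r s tmp =
      if ms = [] then tmp
      else tmp ++ cnt3 (ms.take j) (d, r, s) :: chunkRec (ms.drop j) := by
  intro ms
  induction ms with
  | nil => intro j i n d r s tmp _ _ _ _ _; simp [aChunks]
  | cons m t ih =>
    intro j i n d r s tmp hj1 hj5 hmod hi hn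
    have hmod' : i % 5 = 5 - (j : Int) := by
      rw [← PySem.Int.mod_eq_emod_of_pos (by omega : (0:Int) < 5)]; exact hmod
    simp only [aChunks]
    set d' := if m == "diamond" then d + 1 else d with hd'
    set r' := if m == "diamond" then r else if m == "iron" then r + 1 else r with hr'
    set s' := if m == "diamond" then s else if m == "iron" then s else s + 1 with hs'
    have hstep : ∀ g : List String, cnt3 (m :: g) (d, r, s) = cnt3 g (d', r', s') := by
      intro g
      by_cases hdia : m = "diamond"
      · simp [cnt3, hdia, hd', hr', hs']
      · by_cases hiron : m = "iron"
        · simp [cnt3, hdia, hiron, hd', hr', hs']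
        · simp [cnt3, hdia, hiron, hd', hr', hs']
    have hone : cnt3 [m] (d, r, s) = (d', r', s') := by rw [hstep]; simp [cnt3]
    by_cases hj : j = 1
    · -- group boundary: i % 5 = 4, flush
      subst hj
      have hcond : (PySem.Int.mod i 5 == 4 || (i == n - 1)) = true := by
        have : (PySem.Int.mod i 5 == 4) = true := by
          simp only [beq_iff_eq]
          rw [PySem.Int.mod_eq_emod_of_pos (by omega : (0:Int) < 5)]
          omega
        rw [this, Bool.true_or]
      rw [hcond, if_pos rfl]
      rcases List.eq_nil_or_concat' t with rfl | hcc
      · simp [aChunks, hone, chunkRec_nil, cnt3]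
      · have ht : t ≠ [] := by rcases hcc with ⟨_, _, rfl⟩; simp
        rw [ih 5 (i + 1) n 0 0 0 (tmp ++ [(d', r', s')]) (by omega) (by omega)
          (by rw [PySem.Int.mod_eq_emod_of_pos (by omega : (0:Int) < 5)]; omega)
          (by omega) (by simp at hn ⊢; omega)]
        rw [if_neg ht]
        have hbt : chunkRec t = cnt3 (t.take 5) (0, 0, 0) :: chunkRec (t.drop 5) := by
          rw [chunkRec_cons t ht, cnt3_zero_eq]
        have htk : List.take 1 (m :: t) = [m] := rfl
        have hdp : List.drop 1 (m :: t) = t := rfl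
        simp [hbt, htk, hdp, hone]
    · -- inside a group: j ≥ 2, so i % 5 ≠ 4 and the flush fires only on the last element
      have h4f : (PySem.Int.mod i 5 == 4) = false := by
        simp only [beq_eq_false_iff_ne, ne_eq]
        rw [PySem.Int.mod_eq_emod_of_pos (by omega : (0:Int) < 5)]
        omega
      rcases List.eq_nil_or_concat' t with rfl | hcc
      · -- last element of the input: i == n - 1 flushes
        have hcond : (PySem.Int.mod i 5 == 4 || (i == n - 1)) = true := by
          have hl : (i == n - 1) = true := by
            simp only [beq_iff_eq]; simp at hn; omega
          rw [h4f, hl, Bool.false_or]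
        rw [hcond, if_pos rfl]
        have htk : List.take j [m] = [m] := List.take_of_length_le (by simp; omega)
        have hdp : List.drop j [m] = ([] : List String) := by
          apply List.drop_eq_nil_of_le; simp; omega
        simp [aChunks, htk, hdp, hone, chunkRec_nil]
      · have ht : t ≠ [] := by rcases hcc with ⟨_, _, rfl⟩; simp
        have hcond : (PySem.Int.mod i 5 == 4 || (i == n - 1)) = false := by
          have hl : (i == n - 1) = false := by
            simp only [beq_eq_false_iff_ne, ne_eq]
            have h1 : (1:Int) ≤ t.length := by
              have := List.length_pos_iff.mpr ht; exact_mod_cast this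
            simp at hn; omega
          rw [h4f, hl, Bool.or_false]
        rw [hcond]
        simp only [Bool.false_eq_true, if_false]
        rw [ih (j - 1) (i + 1) n d' r' s' tmp (by omega) (by omega)
          (by rw [PySem.Int.mod_eq_emod_of_pos (by omega : (0:Int) < 5)]
              have hcast : ((j - 1 : Nat) : Int) = (j : Int) - 1 := by omega
              omega)
          (by omega) (by simp at hn ⊢; omega)]
        rw [if_neg ht, if_neg (by simp : ¬(m :: t) = [])]
        have htake : (m :: t).take j = m :: t.take (j - 1) := by
          rcases Nat.exists_eq_add_of_le hj1 with ⟨k, rfl⟩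
          simp [Nat.add_comm 1 k, List.take_succ_cons]
        have hdrop : (m :: t).drop j = t.drop (j - 1) := by
          rcases Nat.exists_eq_add_of_le hj1 with ⟨k, rfl⟩
          simp [Nat.add_comm 1 k, List.drop_succ_cons]
        rw [htake, hdrop, hstep]

-- range(a, b, 5), structurally (derived from PySem.List.pyRange_of_pos)
lemma pyRange5_nil (a b : Int) (h : b ≤ a) : PySem.List.pyRange a b 5 = [] := by
  rw [PySem.List.pyRange_of_pos a b (by omega)]
  rw [if_neg (by omega)]
  simp

lemma pyRange5_cons (a b : Int) (h : a < b) :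
    PySem.List.pyRange a b 5 = a :: PySem.List.pyRange (a + 5) b 5 := by
  rw [PySem.List.pyRange_of_pos a b (by omega), PySem.List.pyRange_of_pos (a + 5) b (by omega)]
  by_cases h2 : a + 5 < b
  · rw [if_pos h, if_pos h2]
    have hn : ((b - a + 5 - 1) / 5).toNat = ((b - (a + 5) + 5 - 1) / 5).toNat + 1 := by omega
    rw [hn, List.range_succ_eq_map]
    simp only [List.map_cons, List.map_map, Nat.cast_zero, mul_zero, add_zero]
    congr 1
    apply List.map_congr_left
    intro k _
    simp only [Function.comp_apply]
    push_cast
    ring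
  · rw [if_pos h, if_neg h2]
    have hn : ((b - a + 5 - 1) / 5).toNat = 1 := by omega
    rw [hn]
    simp

-- B's fold over range(0, len, 5) is the take-5/drop-5 recursion
lemma bChunks_fold (ms : List String) : ∀ (k j : Nat) (acc : List (Int × Int × Int)),
    ms.length - j ≤ k →
    (PySem.List.pyRange (j : Int) (ms.length : Int) 5).foldl
      (fun acc j =>
        let g := PySem.List.slice ms (some j) (some (j + 5))
        let d : Int := (g.count "diamond" : Int)
        let i : Int := (g.count "iron" : Int)
        acc ++ [(d, i, (g.length : Int) - d - i)]) acc
      = acc ++ chunkRec (ms.drop j) := by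
  intro k
  induction k with
  | zero =>
    intro j acc hk
    have hj : ms.length ≤ j := by omega
    rw [pyRange5_nil _ _ (by exact_mod_cast hj), List.drop_eq_nil_of_le hj]
    simp [chunkRec_nil]
  | succ k ihk =>
    intro j acc hk
    by_cases hj : ms.length ≤ j
    · rw [pyRange5_nil _ _ (by exact_mod_cast hj), List.drop_eq_nil_of_le hj]
      simp [chunkRec_nil]
    · have hjl : j < ms.length := by omega
      rw [pyRange5_cons _ _ (by exact_mod_cast hjl)]
      simp only [List.foldl_cons]
      have hslice : PySem.List.slice ms (some (j : Int)) (some ((j : Int) + 5))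
          = (ms.drop j).take 5 := by
        have := PySem.List.slice_natCast_add ms j 5
        push_cast at this ⊢
        exact this
      rw [hslice]
      have hcast : ((j : Int) + 5) = ((j + 5 : Nat) : Int) := by push_cast; ring
      rw [hcast, ihk (j + 5) _ (by omega)]
      have hdd : ms.drop (j + 5) = (ms.drop j).drop 5 := by
        rw [List.drop_drop]
      have hne : ms.drop j ≠ [] := by
        intro hnil
        have := List.drop_eq_nil_iff.mp hnil
        omega
      rw [hdd, chunkRec_cons (ms.drop j) hne]
      simp

lemma bChunks_eq_chunkRec (ms : List String) : bChunks ms = chunkRec ms := by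
  unfold bChunks
  have h0 : ((0 : Nat) : Int) = (0 : Int) := rfl
  have := bChunks_fold ms ms.length 0 [] (by omega)
  simpa using this

lemma aChunks_eq (ms : List String) :
    aChunks ms 0 (ms.length : Int) 0 0 0 [] = bChunks ms := by
  rw [bChunks_eq_chunkRec]
  rcases eq_or_ne ms [] with rfl | h
  · simp [aChunks, chunkRec_nil]
  · rw [aChunks_eq_general ms 5 0 (ms.length : Int) 0 0 0 [] (by omega) (by omega)
      (by rw [PySem.Int.mod_eq_emod_of_pos (by omega : (0:Int) < 5)]; omega) (by omega) (by omega)]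
    rw [if_neg h, chunkRec_cons ms h, cnt3_zero_eq]
    simp

-- skipping an exhausted type: walking from t and from t+1 agree when picks[t] = 0
lemma bSkip_step (ps : List Int) (t : Nat) (ht : t < 3) (h0 : ps.getD t 0 = 0) :
    bSkip ps t = bSkip ps (t + 1) := by
  have h0' : ps[t]?.getD 0 = 0 := by simpa [List.getD] using h0
  rw [bSkip]; simp [ht, h0']

lemma bWalk_shift (cs : List (Int × Int × Int)) (ps : List Int) (t : Nat) (ans : Int)
    (ht : t < 3) (h0 : ps.getD t 0 = 0) :
    bWalk cs t ps ans = bWalk cs (t + 1) ps ans := by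
  cases cs with
  | nil => simp [bWalk]
  | cons c cs' => simp only [bWalk, bSkip_step ps t ht h0]

lemma bSkip_of_ne (ps : List Int) (t : Nat) (h0 : ps.getD t 0 ≠ 0) :
    bSkip ps t = t := by
  have h0' : ¬ ps[t]?.getD 0 = 0 := by simpa [List.getD] using h0
  rw [bSkip]; simp [h0']

-- phase 0
lemma walk0 : ∀ (cs : List (Int × Int × Int)) (p0 ans : Int) (p1 p2 : Int) (rest : List Int),
    bWalk cs 0 (p0 :: p1 :: p2 :: rest) ans =
      bWalk (aMine0 cs p0 ans).2 1 (0 :: p1 :: p2 :: rest) (aMine0 cs p0 ans).1 := by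
  intro cs
  induction cs with
  | nil => intro p0 ans p1 p2 rest; simp [bWalk, aMine0]
  | cons c cs' ih =>
    intro p0 ans p1 p2 rest
    by_cases h0 : p0 = 0
    · subst h0
      rw [bWalk_shift (c :: cs') _ 0 ans (by omega) (by simp)]
      simp [aMine0]
    · have hskip : bSkip (p0 :: p1 :: p2 :: rest) 0 = 0 :=
        bSkip_of_ne _ 0 (by simpa using h0)
      simp only [bWalk, hskip, aMine0, if_pos h0]
      have harg : ans + ((bW 0).1 * c.1 + (bW 0).2.1 * c.2.1 + (bW 0).2.2 * c.2.2)
          = ans + (c.1 + c.2.1 + c.2.2) := by simp [bW]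
      simp only [List.set, List.getD, List.getElem?_cons_zero, Option.getD_some]
      rw [harg]
      exact ih (p0 - 1) (ans + (c.1 + c.2.1 + c.2.2)) p1 p2 rest

-- phase 1
lemma walk1 : ∀ (cs : List (Int × Int × Int)) (p1 ans : Int) (x p2 : Int) (rest : List Int),
    bWalk cs 1 (x :: p1 :: p2 :: rest) ans =
      bWalk (aMine1 cs p1 ans).2 2 (x :: 0 :: p2 :: rest) (aMine1 cs p1 ans).1 := by
  intro cs
  induction cs with
  | nil => intro p1 ans x p2 rest; simp [bWalk, aMine1]
  | cons c cs' ih =>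
    intro p1 ans x p2 rest
    by_cases h0 : p1 = 0
    · subst h0
      rw [bWalk_shift (c :: cs') _ 1 ans (by omega) (by simp)]
      simp [aMine1]
    · have hskip : bSkip (x :: p1 :: p2 :: rest) 1 = 1 :=
        bSkip_of_ne _ 1 (by simpa using h0)
      simp only [bWalk, hskip, aMine1, if_pos h0]
      have harg : ans + ((bW 1).1 * c.1 + (bW 1).2.1 * c.2.1 + (bW 1).2.2 * c.2.2)
          = ans + (5 * c.1 + c.2.1 + c.2.2) := by simp [bW]
      simp only [List.set, List.getD, List.getElem?_cons_succ, List.getElem?_cons_zero,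
        Option.getD_some]
      rw [harg]
      exact ih (p1 - 1) (ans + (5 * c.1 + c.2.1 + c.2.2)) x p2 rest

-- phase 2
lemma walk2 : ∀ (cs : List (Int × Int × Int)) (p2 ans : Int) (x y : Int) (rest : List Int),
    bWalk cs 2 (x :: y :: p2 :: rest) ans = (aMine2 cs p2 ans).1 := by
  intro cs
  induction cs with
  | nil => intro p2 ans x y rest; simp [bWalk, aMine2]
  | cons c cs' ih =>
    intro p2 ans x y rest
    by_cases h0 : p2 = 0
    · subst h0
      have hskip : bSkip (x :: y :: 0 :: rest) 2 = 3 := by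
        rw [bSkip]; simp
        rw [bSkip]; simp
      simp [bWalk, hskip, aMine2]
    · have hskip : bSkip (x :: y :: p2 :: rest) 2 = 2 :=
        bSkip_of_ne _ 2 (by simpa using h0)
      simp only [bWalk, hskip, aMine2, if_pos h0]
      have harg : ans + ((bW 2).1 * c.1 + (bW 2).2.1 * c.2.1 + (bW 2).2.2 * c.2.2)
          = ans + (25 * c.1 + 5 * c.2.1 + c.2.2) := by simp [bW]
      simp only [List.set, List.getD, List.getElem?_cons_succ, List.getElem?_cons_zero,
        Option.getD_some]
      rw [harg]
      exact ih (p2 - 1) (ans + (25 * c.1 + 5 * c.2.1 + c.2.2)) x y rest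

-- A's mining chain equals B's single walk
lemma walk_eq (cs : List (Int × Int × Int)) (p0 p1 p2 : Int) (rest : List Int) :
    bWalk cs 0 (p0 :: p1 :: p2 :: rest) 0 =
      (aMine2 (aMine1 (aMine0 cs p0 0).2 p1 (aMine0 cs p0 0).1).2 p2
        (aMine1 (aMine0 cs p0 0).2 p1 (aMine0 cs p0 0).1).1).1 := by
  rw [walk0, walk1, walk2]

-- A's truncation branch collapses to B's unconditional slice
lemma slice_of_ge (tmp : List (Int × Int × Int)) (a : Int) (h : (tmp.length : Int) ≤ a) :
    PySem.List.slice tmp (some 0) (some a) = tmp := by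
  rw [PySem.List.slice_zero_start, PySem.List.slice_to tmp (show (0:Int) ≤ a by omega)]
  exact List.take_of_length_le (by omega)

-- ===== VERDICT (by name: the statement is the Claim_ definition above) =====
theorem solution_spec : Claim_equal_solution := by
  intro picks minerals _ hpre
  unfold Spec_solution solution solution_alt
  obtain ⟨p0, p1, p2, rest, rfl⟩ :
      ∃ p0 p1 p2 rest, picks = p0 :: p1 :: p2 :: rest := by
    match picks, hpre with
    | a :: b :: c :: r, _ => exact ⟨a, b, c, r, rfl⟩
  have hg0 : PySem.List.pyGetD (p0 :: p1 :: p2 :: rest) 0 0 = p0 := by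
    simp [pysem]
  have hg1 : PySem.List.pyGetD (p0 :: p1 :: p2 :: rest) 1 0 = p1 := by
    simp [pysem]
  have hg2 : PySem.List.pyGetD (p0 :: p1 :: p2 :: rest) 2 0 = p2 := by
    simp [pysem]
  simp only [hg0, hg1, hg2, aChunks_eq]
  by_cases hcase : p0 + p1 + p2 ≥ ((bChunks minerals).length : Int)
  · rw [if_pos hcase, slice_of_ge (bChunks minerals) (p0 + p1 + p2) hcase]
    exact (walk_eq _ p0 p1 p2 rest).symm
  · rw [if_neg hcase]
    exact (walk_eq _ p0 p1 p2 rest).symm
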